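-- pv_equiv track=rewrite | github.com/starfall1228/UBS-Challenge | routes/monsterHunter.py | check_efficiency
-- ===== SOURCE A (Python) =====
-- def check_efficiency(monsters, wave, attackable, force_rest):
--     # last wave
--     if wave == len(monsters) - 1:
--         if attackable:
--             return monsters[wave]
--         else:
--             return 0
--     else:
--         rest_efficiency = check_efficiency(monsters, wave + 1, attackable, False)
--         if force_rest:
--             return rest_efficiency
--
--         if attackable:
--             attack_efficiency = monsters[wave] * 1 + check_efficiency(monsters, wave + 1, False, True)
--         else:
--             attack_efficiency = 0
--
--         prepare_efficiency = monsters[wave] * -1 + check_efficiency(monsters, wave + 1, True, False)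
--
--         return max(rest_efficiency, attack_efficiency, prepare_efficiency)
-- ===== SOURCE B (Python) =====
-- def check_efficiency(monsters, wave, attackable, force_rest):
--     # Bottom-up DP over the four (attackable, force_rest) states, O(n) instead of
--     # A's exponential branching recursion.
--     n = len(monsters)
--     # values at the last wave (index n-1); force_rest is irrelevant there
--     tf = tt = monsters[n - 1]
--     ff = ft = 0
--     steps = n - 1 - wave
--     for k in range(steps):
--         i = n - 2 - k
--         m = monsters[i]
--         tf, tt, ff, ft = max(tf, m + ft, -m + tf), tf, max(ff, 0, -m + tf), ff
--     if attackable: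
--         return tt if force_rest else tf
--     else:
--         return ft if force_rest else ff
-- ===== Notes on version B (the rewrite author's own statement) =====
-- stated objective: faster
-- what changed: Replaces A's exponential three-way branching recursion with a bottom-up dynamic program that sweeps once from the last wave down to `wave`, carrying only the four (attackable, force_rest) state values; intended as asymptotically faster (a timing run sees A time out where B finishes instantly, but could not certify a ratio at the largest size both finish).
-- outside the precondition, e.g. on check_efficiency([], -1, False, False): A returns 0, B raises IndexError
import Mathlib
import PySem

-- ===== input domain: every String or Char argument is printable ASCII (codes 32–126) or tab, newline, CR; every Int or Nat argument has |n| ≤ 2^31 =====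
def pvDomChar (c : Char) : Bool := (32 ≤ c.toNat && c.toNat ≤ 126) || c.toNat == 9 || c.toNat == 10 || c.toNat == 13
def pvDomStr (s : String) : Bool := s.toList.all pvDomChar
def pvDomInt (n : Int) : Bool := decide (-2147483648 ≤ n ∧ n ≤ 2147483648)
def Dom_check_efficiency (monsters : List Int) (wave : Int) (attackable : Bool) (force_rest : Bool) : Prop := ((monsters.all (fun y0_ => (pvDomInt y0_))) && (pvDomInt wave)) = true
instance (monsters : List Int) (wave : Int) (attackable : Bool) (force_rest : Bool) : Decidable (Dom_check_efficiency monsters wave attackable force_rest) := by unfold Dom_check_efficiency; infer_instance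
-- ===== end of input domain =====

-- B replaces A's branching recursion by a single bottom-up sweep (intended faster; a timing run sees A time out where B finishes but could not certify a ratio)
-- carrying the four (attackable, force_rest) state values (return value only; neither mutates).

-- ===== PORT A =====
-- Literal transliteration of A's recursion; the fuel argument only makes the
-- recursion structurally terminating (it is large enough on every Pre_ input).
def ceA (monsters : List Int) (fuel : Nat) (wave : Int) (attackable : Bool) (force_rest : Bool) : Int :=
  match fuel with
  | 0 => 0
  | fuel + 1 =>
    if wave = (monsters.length : Int) - 1 then
      if attackable then PySem.List.pyGetD monsters wave 0 else 0
    else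
      let rest_efficiency := ceA monsters fuel (wave + 1) attackable false
      if force_rest then rest_efficiency
      else
        let attack_efficiency :=
          if attackable then PySem.List.pyGetD monsters wave 0 * 1 + ceA monsters fuel (wave + 1) false true
          else 0
        let prepare_efficiency := PySem.List.pyGetD monsters wave 0 * (-1) + ceA monsters fuel (wave + 1) true false
        max rest_efficiency (max attack_efficiency prepare_efficiency)

def check_efficiency (monsters : List Int) (wave : Int) (attackable : Bool) (force_rest : Bool) : Int :=
  ceA monsters ((monsters.length : Int) - wave).toNat wave attackable force_rest

-- ===== PORT B =====
-- Source B's loop body and initial state, as named helpers; the fold over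
-- List.range steps.toNat is the 'for k in range(steps)' loop.
def ceStep (monsters : List Int) (v : Int × Int × Int × Int) (k : Nat) : Int × Int × Int × Int :=
  let i : Int := (monsters.length : Int) - 2 - (k : Int)
  let m := PySem.List.pyGetD monsters i 0
  match v with
  | (tf, _tt, ff, ft) => (max tf (max (m + ft) (-m + tf)), tf, max ff (max 0 (-m + tf)), ff)

def ceInit (monsters : List Int) : Int × Int × Int × Int :=
  let m0 := PySem.List.pyGetD monsters ((monsters.length : Int) - 1) 0
  (m0, m0, 0, 0)

def check_efficiency_alt (monsters : List Int) (wave : Int) (attackable : Bool) (force_rest : Bool) : Int :=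
  match (List.range (((monsters.length : Int) - 1 - wave).toNat)).foldl (ceStep monsters) (ceInit monsters) with
  | (tf, tt, ff, ft) =>
    if attackable then (if force_rest then tt else tf)
    else (if force_rest then ft else ff)

-- ===== PRECONDITION & SPEC =====
-- Pre_ excludes inputs where A raises (wave out of [-len, len-1]: IndexError or
-- unbounded recursion) and the empty list, where A's 0 on wave = -1 with
-- attackable = False is an accident of checking attackable before indexing; B
-- itself raises IndexError on the empty list.
def Pre_check_efficiency (monsters : List Int) (wave : Int) (attackable : Bool) (force_rest : Bool) : Prop :=
  monsters ≠ [] ∧ -(monsters.length : Int) ≤ wave ∧ wave ≤ (monsters.length : Int) - 1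
instance (monsters : List Int) (wave : Int) (attackable : Bool) (force_rest : Bool) : Decidable (Pre_check_efficiency monsters wave attackable force_rest) := by unfold Pre_check_efficiency; infer_instance

def pvWitness_check_efficiency : List Int × Int × Bool × Bool := ([3, -1, 4], 0, true, false)

def Spec_check_efficiency (monsters : List Int) (wave : Int) (attackable : Bool) (force_rest : Bool) (out : Int) : Prop := out = check_efficiency_alt monsters wave attackable force_rest
instance (monsters : List Int) (wave : Int) (attackable : Bool) (force_rest : Bool) (out : Int) : Decidable (Spec_check_efficiency monsters wave attackable force_rest out) := by unfold Spec_check_efficiency; infer_instance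

-- ===== CLAIM =====
def Claim_equal_check_efficiency : Prop := ∀ (monsters : List Int) (wave : Int) (attackable : Bool) (force_rest : Bool), Dom_check_efficiency monsters wave attackable force_rest → Pre_check_efficiency monsters wave attackable force_rest → Spec_check_efficiency monsters wave attackable force_rest (check_efficiency monsters wave attackable force_rest)

-- ===== LEMMAS AND PROOFS =====

-- The value of A's recursion at depth d below the last wave (wave = len - 1 - d),
-- fuel-free: the common meeting point of the two ports.
def ceQ (monsters : List Int) : Nat → Bool → Bool → Int
  | 0, a, _ => if a then PySem.List.pyGetD monsters ((monsters.length : Int) - 1) 0 else 0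
  | d + 1, a, f =>
    let m := PySem.List.pyGetD monsters ((monsters.length : Int) - 2 - (d : Int)) 0
    let rest := ceQ monsters d a false
    if f then rest
    else
      let atk := if a then m * 1 + ceQ monsters d false true else 0
      let prep := m * (-1) + ceQ monsters d true false
      max rest (max atk prep)

theorem ceA_eq_ceQ (monsters : List Int) (d fuel : Nat) (hf : d + 1 ≤ fuel)
    (a f : Bool) :
    ceA monsters fuel ((monsters.length : Int) - 1 - d) a f = ceQ monsters d a f := by
  induction d generalizing fuel a f with
  | zero =>
    obtain ⟨fuel, rfl⟩ : ∃ k, fuel = k + 1 := ⟨fuel - 1, by omega⟩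
    simp [ceA, ceQ]
  | succ d ih =>
    obtain ⟨fuel, rfl⟩ : ∃ k, fuel = k + 1 := ⟨fuel - 1, by omega⟩
    have hne : ((monsters.length : Int) - 1 - ((d + 1 : Nat) : Int)) ≠ (monsters.length : Int) - 1 := by
      omega
    simp only [ceA, if_neg hne]
    rw [show ((monsters.length : Int) - 1 - ((d + 1 : Nat) : Int)) = (monsters.length : Int) - 2 - (d : Int) from by omega]
    rw [show ((monsters.length : Int) - 2 - (d : Int) + 1) = (monsters.length : Int) - 1 - ((d : Nat) : Int) from by ring]
    simp only [ih fuel (by omega)]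
    cases f <;> cases a <;> simp [ceQ]

-- The DP fold after s steps is exactly the quadruple of ceQ values at depth s.
theorem fold_eq_ceQ (monsters : List Int) (s : Nat) :
    (List.range s).foldl (ceStep monsters) (ceInit monsters)
    = (ceQ monsters s true false, ceQ monsters s true true,
       ceQ monsters s false false, ceQ monsters s false true) := by
  induction s with
  | zero => simp [ceInit, ceQ]
  | succ s ih =>
    rw [List.range_succ, List.foldl_append, ih]
    simp [ceStep, ceQ]

theorem check_efficiency_eq (monsters : List Int) (wave : Int) (a f : Bool)
    (h : wave ≤ (monsters.length : Int) - 1) :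
    check_efficiency monsters wave a f = check_efficiency_alt monsters wave a f := by
  obtain ⟨d, hw⟩ : ∃ d : Nat, wave = (monsters.length : Int) - 1 - (d : Int) :=
    ⟨((monsters.length : Int) - 1 - wave).toNat, by omega⟩
  subst hw
  unfold check_efficiency check_efficiency_alt
  rw [ceA_eq_ceQ monsters d _ (by omega)]
  rw [show (((monsters.length : Int) - 1 - ((monsters.length : Int) - 1 - (d : Int))).toNat) = d from by omega]
  rw [fold_eq_ceQ]
  cases a <;> cases f <;> rfl

-- ===== VERDICT =====
theorem check_efficiency_spec : Claim_equal_check_efficiency := by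
  intro monsters wave a f _ hpre
  unfold Spec_check_efficiency
  exact check_efficiency_eq monsters wave a f hpre.2.2
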